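-- pv_equiv track=rewrite | github.com/Shlobro/agent-loop | src/core/debug_settings.py | normalize_debug_breakpoints
-- ===== SOURCE A (Python) =====
-- from typing import Any, Dict
--
-- DEBUG_STAGE_LABELS: Dict[str, str] = {
--     "question_generation": "Question Generation",
--     "description_molding": "Description Molding",
--     "research": "Research",
--     "task_planning": "Task Planning",
--     "execution": "Task Execution",
--     "reviewer": "Reviewer",
--     "fixer": "Fixer",
--     "git_commit": "Git Commit",
--     "git_push": "Git Push",
-- }
--
-- def default_debug_breakpoints() -> Dict[str, Dict[str, bool]]:
--     """Return default before/after breakpoint selections per stage."""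
--     return {
--         stage: {"before": True, "after": False}
--         for stage in DEBUG_STAGE_LABELS
--     }
--
-- def normalize_debug_breakpoints(value: Any) -> Dict[str, Dict[str, bool]]:
--     """Normalize persisted breakpoint data into expected shape."""
--     normalized = default_debug_breakpoints()
--     if not isinstance(value, dict):
--         return normalized
--
--     for stage, stage_config in value.items():
--         if stage not in normalized or not isinstance(stage_config, dict):
--             continue
--         normalized[stage]["before"] = bool(stage_config.get("before", False))
--         normalized[stage]["after"] = bool(stage_config.get("after", False))
--
--     return normalized
-- ===== SOURCE B (Python) =====
-- from typing import Any, Dict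
--
-- DEBUG_STAGE_LABELS: Dict[str, str] = {
--     "question_generation": "Question Generation",
--     "description_molding": "Description Molding",
--     "research": "Research",
--     "task_planning": "Task Planning",
--     "execution": "Task Execution",
--     "reviewer": "Reviewer",
--     "fixer": "Fixer",
--     "git_commit": "Git Commit",
--     "git_push": "Git Push",
-- }
--
-- def _stage_entry(cfg: Any) -> Dict[str, bool]:
--     if isinstance(cfg, dict):
--         return {"before": bool(cfg.get("before", False)),
--                 "after": bool(cfg.get("after", False))}
--     return {"before": True, "after": False}
--
-- def normalize_debug_breakpoints(value: Any) -> Dict[str, Dict[str, bool]]: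
--     """Normalize persisted breakpoint data into expected shape."""
--     source = value if isinstance(value, dict) else {}
--     return {stage: _stage_entry(source.get(stage)) for stage in DEBUG_STAGE_LABELS}
-- ===== Notes on version B (the rewrite author's own statement) =====
-- stated objective: simpler
-- what changed: B builds the result directly with one dict comprehension over the canonical DEBUG_STAGE_LABELS keys, one lookup per stage, instead of constructing a default dict and mutating its nested entries while scanning the input's items.
import Mathlib
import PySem

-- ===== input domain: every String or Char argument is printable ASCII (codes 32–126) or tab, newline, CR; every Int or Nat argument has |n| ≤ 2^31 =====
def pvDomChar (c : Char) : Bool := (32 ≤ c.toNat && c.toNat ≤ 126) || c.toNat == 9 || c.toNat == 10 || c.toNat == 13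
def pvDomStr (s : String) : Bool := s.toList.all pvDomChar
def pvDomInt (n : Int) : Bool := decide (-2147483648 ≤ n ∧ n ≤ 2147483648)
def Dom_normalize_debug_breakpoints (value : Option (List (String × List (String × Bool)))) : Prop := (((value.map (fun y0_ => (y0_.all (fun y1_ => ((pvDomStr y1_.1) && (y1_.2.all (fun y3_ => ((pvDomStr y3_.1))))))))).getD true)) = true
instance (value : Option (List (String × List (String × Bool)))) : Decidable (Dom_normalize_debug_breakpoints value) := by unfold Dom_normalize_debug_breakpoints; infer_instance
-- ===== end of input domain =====

-- B rebuilds the result by iterating the canonical stage list with one lookup per stage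
-- (a dict comprehension) instead of mutating a default dict while scanning the input: simpler.


-- ===== PORT A =====
-- module constant: the keys of DEBUG_STAGE_LABELS (shared by both ports)
def pvStages : List String :=
  ["question_generation", "description_molding", "research", "task_planning",
   "execution", "reviewer", "fixer", "git_commit", "git_push"]

-- default_debug_breakpoints(): {stage: {"before": True, "after": False} for stage in DEBUG_STAGE_LABELS}
def pvDefaultBreakpoints : PySem.Dict String (PySem.Dict String Bool) :=
  PySem.Dict.mk (pvStages.map (fun s => (s, PySem.Dict.mk [("before", true), ("after", false)])))

-- loop body: 'continue' unless stage in normalized (stage_config is always a dict in this type);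
-- then normalized[stage]["before"] = …; normalized[stage]["after"] = …  (in-place nested assignment)
def pvStepA (acc : PySem.Dict String (PySem.Dict String Bool))
    (p : String × List (String × Bool)) : PySem.Dict String (PySem.Dict String Bool) :=
  if acc.contains p.1 then
    let acc₁ := acc.modify p.1 PySem.Dict.empty
      (fun cfg => cfg.insert "before" ((PySem.Dict.mk p.2).getD "before" false))
    acc₁.modify p.1 PySem.Dict.empty
      (fun cfg => cfg.insert "after" ((PySem.Dict.mk p.2).getD "after" false))
  else acc

def normalize_debug_breakpoints (value : Option (List (String × List (String × Bool)))) : List (String × List (String × Bool)) :=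
  match value with
  | none => pvDefaultBreakpoints.items.map (fun p => (p.1, p.2.items))
  | some items =>
      let normalized := items.foldl pvStepA pvDefaultBreakpoints
      normalized.items.map (fun p => (p.1, p.2.items))

-- ===== PORT B =====
-- _stage_entry(cfg): cfg is a dict exactly when the lookup returned one
def pvStageEntry (cfg : Option (List (String × Bool))) : List (String × Bool) :=
  match cfg with
  | some c => [("before", (PySem.Dict.mk c).getD "before" false),
               ("after", (PySem.Dict.mk c).getD "after" false)]
  | none => [("before", true), ("after", false)]

def normalize_debug_breakpoints_alt (value : Option (List (String × List (String × Bool)))) : List (String × List (String × Bool)) :=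
  let source := PySem.Dict.mk (value.getD [])
  pvStages.map (fun stage => (stage, pvStageEntry (source.get? stage)))

-- ===== PRECONDITION & SPEC =====
-- Pre_ excludes association lists whose outer stage keys repeat: a Python dict cannot carry
-- duplicate keys, so such lists do not represent any input of the Python programs.
def Pre_normalize_debug_breakpoints (value : Option (List (String × List (String × Bool)))) : Prop :=
  ((value.getD []).map Prod.fst).Nodup
instance (value : Option (List (String × List (String × Bool)))) : Decidable (Pre_normalize_debug_breakpoints value) := by unfold Pre_normalize_debug_breakpoints; infer_instance

def pvWitness_normalize_debug_breakpoints : (Option (List (String × List (String × Bool)))) :=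
  some [("research", [("before", true)]), ("bogus", [])]

def Spec_normalize_debug_breakpoints (value : Option (List (String × List (String × Bool)))) (out : List (String × List (String × Bool))) : Prop := out = normalize_debug_breakpoints_alt value
instance (value : Option (List (String × List (String × Bool)))) (out : List (String × List (String × Bool))) : Decidable (Spec_normalize_debug_breakpoints value out) := by unfold Spec_normalize_debug_breakpoints; infer_instance

-- ===== CLAIM (what is proved, stated in full; the proofs are below) =====
def Claim_equal_normalize_debug_breakpoints : Prop := ∀ (value : Option (List (String × List (String × Bool)))), Dom_normalize_debug_breakpoints value → Pre_normalize_debug_breakpoints value → Spec_normalize_debug_breakpoints value (normalize_debug_breakpoints value)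

-- ===== LEMMAS AND PROOFS =====

-- the canonical inner dict written by one loop iteration
def pvCanon (c : List (String × Bool)) : PySem.Dict String Bool :=
  PySem.Dict.mk [("before", (PySem.Dict.mk c).getD "before" false),
                 ("after", (PySem.Dict.mk c).getD "after" false)]

-- invariant of A's accumulator: keys are exactly the stages, every inner dict has shape before/after
def pvInv (d : PySem.Dict String (PySem.Dict String Bool)) : Prop :=
  d.keys = pvStages ∧
  ∀ k ∈ pvStages, ((d.getD k PySem.Dict.empty).items.map Prod.fst) = ["before", "after"]

theorem pvInv_default : pvInv pvDefaultBreakpoints := by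
  constructor
  · decide
  · intro k hk; fin_cases hk <;> decide

-- glue: d[k] = f(d.get(k, d0)) is an overwriting insert (definitional in PySem)
theorem pv_modify_eq {ν : Type} (d : PySem.Dict String ν) (k : String) (d0 : ν) (f : ν → ν) :
    d.modify k d0 f = d.insert k (f (d.getD k d0)) := rfl

theorem pv_insert_shape (inner : PySem.Dict String Bool)
    (h : inner.items.map Prod.fst = ["before", "after"]) (x y : Bool) :
    (inner.insert "before" x).insert "after" y = PySem.Dict.mk [("before", x), ("after", y)] := by
  obtain ⟨l⟩ := inner
  rcases l with _ | ⟨⟨k1, a⟩, _ | ⟨⟨k2, b⟩, rest⟩⟩ <;> simp_all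
  obtain ⟨h1, h2, h3⟩ := h
  subst h1; subst h2; subst h3
  revert a b x y; decide

theorem pvStepA_keys (d : PySem.Dict String (PySem.Dict String Bool))
    (p : String × List (String × Bool)) : (pvStepA d p).keys = d.keys := by
  unfold pvStepA
  by_cases hc : d.contains p.1 = true
  · simp only [hc, if_true, pv_modify_eq, PySem.Dict.insert_insert_self]
    exact PySem.Dict.keys_insert_of_contains _ _ hc
  · simp [hc]

theorem pvStepA_getD (d : PySem.Dict String (PySem.Dict String Bool)) (hinv : pvInv d)
    (p : String × List (String × Bool)) (k : String) :
    (pvStepA d p).getD k PySem.Dict.empty =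
      if k = p.1 ∧ p.1 ∈ pvStages then pvCanon p.2 else d.getD k PySem.Dict.empty := by
  obtain ⟨hkeys, hshape⟩ := hinv
  have hc : d.contains p.1 = decide (p.1 ∈ pvStages) := by
    rw [PySem.Dict.contains_eq_decide_mem_keys, hkeys]
  unfold pvStepA
  rw [hc]
  by_cases hmem : p.1 ∈ pvStages
  · simp only [hmem, decide_true, if_true, pv_modify_eq, PySem.Dict.getD_insert]
    by_cases hk : k = p.1
    · simp only [hk, and_self, if_true]
      have := pv_insert_shape (d.getD p.1 PySem.Dict.empty) (hshape _ hmem)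
        ((PySem.Dict.mk p.2).getD "before" false) ((PySem.Dict.mk p.2).getD "after" false)
      rw [this]; rfl
    · simp [hk]
  · simp [hmem]

theorem pvStepA_inv (d : PySem.Dict String (PySem.Dict String Bool)) (hinv : pvInv d)
    (p : String × List (String × Bool)) : pvInv (pvStepA d p) := by
  constructor
  · rw [pvStepA_keys, hinv.1]
  · intro k hk
    rw [pvStepA_getD d hinv p k]
    by_cases h : k = p.1 ∧ p.1 ∈ pvStages
    · rw [if_pos h]; rfl
    · rw [if_neg h]; exact hinv.2 k hk

-- the loop, characterised by first-match lookup in the (nodup-keyed) input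
theorem pv_foldl_getD (items : List (String × List (String × Bool)))
    (d : PySem.Dict String (PySem.Dict String Bool))
    (hnd : (items.map Prod.fst).Nodup) (hinv : pvInv d) (k : String) :
    (items.foldl pvStepA d).getD k PySem.Dict.empty =
      match (PySem.Dict.mk items).get? k with
      | some cfg => if k ∈ pvStages then pvCanon cfg else d.getD k PySem.Dict.empty
      | none => d.getD k PySem.Dict.empty := by
  induction items generalizing d with
  | nil => rfl
  | cons p rest ih =>
    obtain ⟨hp, hndrest⟩ := List.nodup_cons.mp hnd
    have hstep := pvStepA_inv d hinv p
    rw [List.foldl_cons, ih (pvStepA d p) hndrest hstep]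
    rcases p with ⟨k0, c0⟩
    rw [PySem.Dict.get?_mk_cons]
    by_cases hk : k0 = k
    · subst hk
      have hnone : (PySem.Dict.mk rest).get? k0 = none := by
        rw [PySem.Dict.get?_eq_none_iff_not_mem_keys]
        simpa using hp
      simp only [hnone, beq_self_eq_true, if_true]
      rw [pvStepA_getD d hinv ⟨k0, c0⟩ k0]
      by_cases hmem : k0 ∈ pvStages
      · simp [hmem]
      · simp [hmem]
    · have hbeq : (k0 == k) = false := by simp [hk]
      simp only [hbeq, Bool.false_eq_true, if_false]
      rw [pvStepA_getD d hinv ⟨k0, c0⟩ k]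
      have hne : ¬(k = k0 ∧ k0 ∈ pvStages) := fun h => hk h.1.symm
      rw [if_neg hne]

theorem pv_foldl_inv (items : List (String × List (String × Bool)))
    (d : PySem.Dict String (PySem.Dict String Bool))
    (hnd : (items.map Prod.fst).Nodup) (hinv : pvInv d) :
    pvInv (items.foldl pvStepA d) := by
  induction items generalizing d with
  | nil => exact hinv
  | cons p rest ih =>
    exact ih (pvStepA d p) (List.nodup_cons.mp hnd).2 (pvStepA_inv d hinv p)

theorem pv_default_getD (k : String) (hk : k ∈ pvStages) :
    pvDefaultBreakpoints.getD k PySem.Dict.empty = PySem.Dict.mk [("before", true), ("after", false)] := by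
  fin_cases hk <;> decide

-- ===== VERDICT (by name: the statement is the Claim_ definition above) =====
theorem normalize_debug_breakpoints_spec : Claim_equal_normalize_debug_breakpoints := by
  intro value _hdom hpre
  unfold Spec_normalize_debug_breakpoints
  match value with
  | none => decide
  | some items =>
    have hnd : (items.map Prod.fst).Nodup := by simpa [Pre_normalize_debug_breakpoints] using hpre
    have hfin := pv_foldl_inv items pvDefaultBreakpoints hnd pvInv_default
    have hkeysnd : (items.foldl pvStepA pvDefaultBreakpoints).keys.Nodup := by
      rw [hfin.1]; decide
    show (items.foldl pvStepA pvDefaultBreakpoints).items.map (fun p => (p.1, p.2.items)) = _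
    rw [PySem.Dict.items_eq_map_keys _ hkeysnd PySem.Dict.empty, hfin.1, List.map_map]
    unfold normalize_debug_breakpoints_alt
    simp only [Option.getD_some]
    apply List.map_congr_left
    intro k hk
    simp only [Function.comp]
    rw [pv_foldl_getD items pvDefaultBreakpoints hnd pvInv_default k]
    cases hget : (PySem.Dict.mk items).get? k with
    | none => rw [pv_default_getD k hk]; rfl
    | some cfg => simp [hk, pvCanon, pvStageEntry]
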